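-- pv_equiv track=rewrite | github.com/LightWare-Optoelectronics/SampleLibrary | binary protocol/sf22_python_serial/lwnx.py | getStr16
-- ===== SOURCE A (Python) =====
-- def getStr16(packetData):
-- 	result = ''
-- 	for i in range(0, 16):
-- 		if packetData[4 + i] == 0:
-- 			break
-- 		else:
-- 			result += chr(packetData[4 + i])
--
-- 	return result
-- ===== SOURCE B (Python) =====
-- def getStr16(packetData):
-- 	n = 4
-- 	while n < 20 and packetData[n] != 0:
-- 		n += 1
-- 	return ''.join(map(chr, packetData[4:n]))
-- ===== Notes on version B (the rewrite author's own statement) =====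
-- stated objective: idiomatic
-- what changed: Replaces the per-character accumulate-with-break loop by a locate-then-decode pass: a short while loop only finds the null terminator's position, and the string is produced in one bulk slice-and-map(chr)/join; Pre_ additionally excludes windows holding lone-surrogate codes, which A returns but no Lean String can represent.
import Mathlib
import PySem

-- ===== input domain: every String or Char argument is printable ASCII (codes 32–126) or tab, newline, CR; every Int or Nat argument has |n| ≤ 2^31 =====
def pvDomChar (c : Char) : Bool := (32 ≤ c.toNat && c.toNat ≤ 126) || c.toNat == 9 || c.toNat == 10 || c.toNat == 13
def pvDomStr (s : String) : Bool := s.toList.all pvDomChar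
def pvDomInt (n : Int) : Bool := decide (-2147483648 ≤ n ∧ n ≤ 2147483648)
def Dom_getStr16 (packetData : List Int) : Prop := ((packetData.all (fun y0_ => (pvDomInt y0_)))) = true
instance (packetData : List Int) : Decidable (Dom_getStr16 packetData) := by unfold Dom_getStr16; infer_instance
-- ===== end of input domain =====

-- B replaces A's per-character accumulate-with-break loop by a locate-then-decode pass: a while scan finds the
-- null terminator, then one bulk slice-and-map(chr)/join produces the string (idiomatic decomposition; same cost).

-- ===== PORT A =====
-- chr(v) on an admitted input (Pre_ forces a valid scalar value) is Char.ofNat v.toNat;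
-- the growing Python str is kept as a List Char and packed once at the end (Lean's String ops are opaque).
def getStr16Loop (packetData : List Int) (i : Nat) (result : List Char) : List Char :=
  if i < 16 then
    match PySem.List.pyGet? packetData ((4 : Int) + (i : Int)) with
    | none => result    -- Python raises IndexError here; such inputs are outside Pre_getStr16
    | some v =>
      if v = 0 then result
      else getStr16Loop packetData (i + 1) (result ++ [Char.ofNat v.toNat])
  else result
termination_by 16 - i

def getStr16 (packetData : List Int) : String :=
  String.ofList (getStr16Loop packetData 0 [])

-- ===== PORT B =====
-- the while loop locating the terminator: returns the first n in [4, 20) with packetData[n] == 0, else 20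
def getStr16End (packetData : List Int) (n : Nat) : Nat :=
  if _h : n < 20 then
    match PySem.List.pyGet? packetData ((n : Int)) with
    | none => n        -- Python raises IndexError here; such inputs are outside Pre_getStr16
    | some v => if v = 0 then n else getStr16End packetData (n + 1)
  else n
termination_by 20 - n

def getStr16_alt (packetData : List Int) : String :=
  let n := getStr16End packetData 4
  String.ofList ((PySem.List.slice packetData (some 4) (some ((n : Int)))).map (fun v => Char.ofNat v.toNat))

-- ===== PRECONDITION & SPEC =====
-- a value chr accepts AND Lean's Char can hold (a non-negative scalar value that is not a lone surrogate)
def pvValidCode (v : Int) : Prop := 0 ≤ v ∧ (v < 0xD800 ∨ (0xE000 ≤ v ∧ v ≤ 0x10FFFF))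
-- Pre_ excludes packets where A raises (IndexError: a packet too short with no null in the window; ValueError:
-- a consumed value outside chr's range) and packets whose consumed values include lone surrogates, which A
-- returns but which no Lean String can represent.
def Pre_getStr16 (packetData : List Int) : Prop :=
  (0 ∈ (packetData.drop 4).take 16 ∨ 20 ≤ packetData.length) ∧
  ∀ v ∈ ((packetData.drop 4).take 16).takeWhile (· ≠ 0), pvValidCode v
instance (packetData : List Int) : Decidable (Pre_getStr16 packetData) := by
  unfold Pre_getStr16 pvValidCode; infer_instance
def pvWitness_getStr16 : List Int := [3, 4, 3, 4, 98, 77, 62, 78, 77, 0, 84]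

def Spec_getStr16 (packetData : List Int) (out : String) : Prop := out = getStr16_alt packetData
instance (packetData : List Int) (out : String) : Decidable (Spec_getStr16 packetData out) := by unfold Spec_getStr16; infer_instance

-- ===== CLAIM (what is proved, stated in full; the proofs are below) =====
def Claim_equal_getStr16 : Prop := ∀ (packetData : List Int), Dom_getStr16 packetData → Pre_getStr16 packetData → Spec_getStr16 packetData (getStr16 packetData)

-- ===== LEMMAS AND PROOFS =====

lemma getStr16Loop_eq (pd : List Int) :
    ∀ (n i : Nat) (res : List Char), i + n = 16 →
      getStr16Loop pd i res =
        res ++ (((pd.drop (4 + i)).take n).takeWhile (· ≠ 0)).map (fun v => Char.ofNat v.toNat) := by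
  intro n
  induction n with
  | zero =>
    intro i res h
    have h16 : ¬ i < 16 := by omega
    rw [getStr16Loop, if_neg h16]; simp
  | succ m ih =>
    intro i res h
    have h16 : i < 16 := by omega
    rw [getStr16Loop, if_pos h16]
    have hc : (4 : Int) + (i : Int) = ((4 + i : Nat) : Int) := by push_cast; ring
    rw [hc, PySem.List.pyGet?_natCast]
    by_cases hlen : 4 + i < pd.length
    · have hdrop := List.drop_eq_getElem_cons hlen
      rw [List.getElem?_eq_getElem hlen]
      by_cases hv : pd[4 + i] = 0
      · simp [hv, hdrop]
      · simp only [if_neg hv]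
        rw [ih (i + 1) _ (by omega)]
        simp only [hdrop, List.take_succ_cons, List.takeWhile_cons]
        simp [hv, List.append_assoc, show 4 + (i + 1) = 4 + i + 1 from by omega]
    · rw [List.getElem?_eq_none (by omega), List.drop_eq_nil_of_le (by omega)]
      simp

lemma getStr16_eq_common (pd : List Int) :
    getStr16 pd =
      String.ofList ((((pd.drop 4).take 16).takeWhile (· ≠ 0)).map (fun v => Char.ofNat v.toNat)) := by
  unfold getStr16
  rw [getStr16Loop_eq pd 16 0 [] rfl]
  simp

lemma getStr16End_eq (pd : List Int) :
    ∀ (m n : Nat), n + m = 20 →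
      getStr16End pd n = n + (((pd.drop n).take m).takeWhile (· ≠ 0)).length := by
  intro m
  induction m with
  | zero =>
    intro n h
    have h20 : ¬ n < 20 := by omega
    rw [getStr16End, dif_neg h20]; simp
  | succ k ih =>
    intro n h
    have h20 : n < 20 := by omega
    rw [getStr16End, dif_pos h20, PySem.List.pyGet?_natCast]
    by_cases hlen : n < pd.length
    · have hdrop := List.drop_eq_getElem_cons hlen
      rw [List.getElem?_eq_getElem hlen]
      by_cases hv : pd[n] = 0
      · simp [hv, hdrop]
      · simp only [if_neg hv]
        rw [ih (n + 1) (by omega)]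
        simp only [hdrop, List.take_succ_cons, List.takeWhile_cons]
        simp [hv]
        omega
    · rw [List.getElem?_eq_none (by omega), List.drop_eq_nil_of_le (by omega)]
      simp

lemma getStr16_alt_eq_common (pd : List Int) :
    getStr16_alt pd =
      String.ofList ((((pd.drop 4).take 16).takeWhile (· ≠ 0)).map (fun v => Char.ofNat v.toNat)) := by
  unfold getStr16_alt
  rw [getStr16End_eq pd 16 4 rfl]
  set T := ((pd.drop 4).take 16).takeWhile (· ≠ 0) with hT
  have hs : PySem.List.slice pd (some 4) (some ((4 + T.length : Nat) : Int)) =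
      (pd.drop 4).take T.length := by
    have := PySem.List.slice_natCast pd 4 (4 + T.length)
    simpa using this
  have hpre : T <+: pd.drop 4 :=
    (List.takeWhile_prefix _).trans (List.take_prefix _ _)
  have htake : (pd.drop 4).take T.length = T := (List.prefix_iff_eq_take.mp hpre).symm
  simp only [hs, htake]

-- ===== VERDICT (by name: the statement is the Claim_ definition above) =====
theorem getStr16_spec : Claim_equal_getStr16 := by
  intro pd _ _
  unfold Spec_getStr16
  rw [getStr16_eq_common, getStr16_alt_eq_common]
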